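-- pv_equiv track=rewrite | github.com/tarohi24/bowi_archive | bowi/methods/methods/fuzzy/fuzzy.py | offsetted_ind
-- ===== SOURCE A (Python) =====
-- from typing import List, Optional
--
-- def offsetted_ind(ind: int, ranges: List[int]) -> int:
--     """
--     Calculate the original index of given ind
--
--     >>> offset(1, [0])
--     2
--     >>> offset(1, [1])
--     2
--     >>> offset(1, [2])
--     1
--     >>> offset(100, [1, 3, 5, 101])
--     103
--     """
--     if len(ranges) == 0:
--         return ind
--     else:
--         head, *tail = ranges
--         if ind < head:
--             return ind
--         else:
--             return offsetted_ind(ind, tail) + 1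
-- ===== SOURCE B (Python) =====
-- def offsetted_ind(ind, ranges):
--     count = 0
--     for r in ranges:
--         if ind < r:
--             break
--         count += 1
--     return ind + count
-- ===== Notes on version B (the rewrite author's own statement) =====
-- stated objective: simpler
-- what changed: Replaces the head/tail recursion that adds 1 on each return with an iterative loop accumulating a count of leading elements <= ind and a single final addition ind + count.
import Mathlib
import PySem

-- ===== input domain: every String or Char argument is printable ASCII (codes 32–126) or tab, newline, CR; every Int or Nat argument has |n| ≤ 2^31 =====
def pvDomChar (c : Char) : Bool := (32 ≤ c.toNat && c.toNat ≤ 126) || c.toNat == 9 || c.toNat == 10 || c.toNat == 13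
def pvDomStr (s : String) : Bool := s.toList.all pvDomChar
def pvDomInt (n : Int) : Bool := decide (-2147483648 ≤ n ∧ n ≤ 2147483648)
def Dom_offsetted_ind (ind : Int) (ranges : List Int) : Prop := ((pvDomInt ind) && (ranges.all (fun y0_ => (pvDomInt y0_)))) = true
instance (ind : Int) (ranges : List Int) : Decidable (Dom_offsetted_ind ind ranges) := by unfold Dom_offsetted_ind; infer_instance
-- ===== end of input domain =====

-- B replaces A's head/tail recursion (+1 on each return) with an iterative loop
-- accumulating a count of leading elements <= ind, returning ind + count (objective: simpler).


-- ===== PORT A =====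
-- literal transliteration of A's recursion: empty → ind; ind < head → ind; else recurse on tail and add 1
def offsetted_ind (ind : Int) (ranges : List Int) : Int :=
  match ranges with
  | [] => ind
  | head :: tail => if ind < head then ind else offsetted_ind ind tail + 1

-- ===== PORT B =====
-- the loop of Source B: count accumulator, break on ind < r
def offsetted_ind_altLoop (ind : Int) (ranges : List Int) (count : Int) : Int :=
  match ranges with
  | [] => count
  | r :: rs => if ind < r then count else offsetted_ind_altLoop ind rs (count + 1)

def offsetted_ind_alt (ind : Int) (ranges : List Int) : Int :=
  ind + offsetted_ind_altLoop ind ranges 0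

-- ===== PRECONDITION & SPEC =====
def Spec_offsetted_ind (ind : Int) (ranges : List Int) (out : Int) : Prop := out = offsetted_ind_alt ind ranges
instance (ind : Int) (ranges : List Int) (out : Int) : Decidable (Spec_offsetted_ind ind ranges out) := by unfold Spec_offsetted_ind; infer_instance

-- ===== CLAIM (what is proved, stated in full; the proofs are below) =====
def Claim_equal_offsetted_ind : Prop := ∀ (ind : Int) (ranges : List Int), Dom_offsetted_ind ind ranges → Spec_offsetted_ind ind ranges (offsetted_ind ind ranges)

-- ===== LEMMAS AND PROOFS =====
theorem offsetted_ind_altLoop_shift (ind : Int) (ranges : List Int) (c : Int) :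
    offsetted_ind_altLoop ind ranges (c + 1) = offsetted_ind_altLoop ind ranges c + 1 := by
  induction ranges generalizing c with
  | nil => simp [offsetted_ind_altLoop]
  | cons r rs ih =>
    simp only [offsetted_ind_altLoop]
    split
    · rfl
    · exact ih (c + 1)

theorem offsetted_ind_eq (ind : Int) (ranges : List Int) :
    offsetted_ind ind ranges = ind + offsetted_ind_altLoop ind ranges 0 := by
  induction ranges with
  | nil => simp [offsetted_ind, offsetted_ind_altLoop]
  | cons r rs ih =>
    simp only [offsetted_ind, offsetted_ind_altLoop]
    split
    · simp
    · rw [ih, offsetted_ind_altLoop_shift]; ring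

-- ===== VERDICT (by name: the statement is the Claim_ definition above) =====
theorem offsetted_ind_spec : Claim_equal_offsetted_ind := by
  intro ind ranges _
  unfold Spec_offsetted_ind offsetted_ind_alt
  exact offsetted_ind_eq ind ranges
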